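-- pv_equiv track=rewrite | github.com/akent4000/Universal-Gate-Compiler | nand_optimizer/implicant.py | _expand_cubes_to_set
-- ===== SOURCE A (Python) =====
-- from typing import Dict, List, Set, Tuple
--
-- DASH = -1  # wildcard / don't-care position in a ternary cube
--
-- def _expand_cubes_to_set(cubes: List[Tuple[int, ...]], n_vars: int) -> Set[int]:
--     """Expand ternary cubes to the set of minterm integers they cover.
--
--     Only call for small n (n <= 20); for large n the result is exponential.
--     """
--     result: Set[int] = set()
--     for cube in cubes:
--         minterms = [0]
--         for i, b in enumerate(cube):        # i=0 is MSB
--             bit_pos = n_vars - 1 - i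
--             if b == DASH:
--                 minterms = minterms + [m | (1 << bit_pos) for m in minterms]
--             elif b == 1:
--                 minterms = [m | (1 << bit_pos) for m in minterms]
--             # b == 0: bit stays 0
--         result.update(minterms)
--     return result
-- ===== SOURCE B (Python) =====
-- from typing import Dict, List, Set, Tuple
--
-- DASH = -1  # wildcard / don't-care position in a ternary cube
--
--
-- def _expand_cubes_to_set(cubes: List[Tuple[int, ...]], n_vars: int) -> Set[int]:
--     """Expand ternary cubes to the set of minterm integers they cover.
--
--     One pass per cube collects base (OR of the fixed 1-bits) and the bit values
--     of the dash positions; the covered minterms are then base OR-ed with every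
--     subset of the dash bits, enumerated by an integer mask.
--     """
--     result: Set[int] = set()
--     for cube in cubes:
--         base = 0
--         dash_bits: List[int] = []
--         for i, b in enumerate(cube):        # i=0 is MSB
--             bit_pos = n_vars - 1 - i
--             if b == DASH:
--                 dash_bits.append(1 << bit_pos)
--             elif b == 1:
--                 base |= 1 << bit_pos
--             # b == 0: bit stays 0
--         for mask in range(1 << len(dash_bits)):
--             v = base
--             for idx, bit in enumerate(dash_bits):
--                 if (mask >> idx) & 1:
--                     v |= bit
--             result.add(v)
--     return result
-- ===== Notes on version B (the rewrite author's own statement) =====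
-- stated objective: alternative
-- what changed: Per cube, A repeatedly doubles/rewrites a growing minterm list at every cube position; B makes one pass collecting base (OR of fixed 1-bits) and the dash-bit values, then enumerates all subsets of the dash bits with an integer mask loop.
import Mathlib
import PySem

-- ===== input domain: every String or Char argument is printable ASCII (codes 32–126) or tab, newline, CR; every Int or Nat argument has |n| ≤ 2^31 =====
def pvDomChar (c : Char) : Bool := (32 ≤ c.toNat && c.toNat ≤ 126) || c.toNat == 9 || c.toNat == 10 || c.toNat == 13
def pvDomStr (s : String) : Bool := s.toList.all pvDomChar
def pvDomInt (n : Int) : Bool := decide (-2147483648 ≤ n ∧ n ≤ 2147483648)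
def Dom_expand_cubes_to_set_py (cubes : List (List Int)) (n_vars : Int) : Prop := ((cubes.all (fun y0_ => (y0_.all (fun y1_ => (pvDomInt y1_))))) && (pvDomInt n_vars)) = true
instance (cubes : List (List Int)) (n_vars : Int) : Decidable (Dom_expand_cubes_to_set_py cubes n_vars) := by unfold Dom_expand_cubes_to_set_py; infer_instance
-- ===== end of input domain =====

-- B replaces A's incremental list-doubling per cube by one pass collecting base | fixed 1-bits
-- and the dash-bit values, then enumerating all subsets of the dash bits by an integer mask
-- (objective: alternative algorithm, same exponential cost).

-- ===== PORT A =====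
-- body of A's inner 'for i, b in enumerate(cube)' loop
def pvA_step (n_vars : Int) (minterms : List Int) (ib : Int × Int) : List Int :=
  let bit_pos := n_vars - 1 - ib.1
  if ib.2 = -1 then
    minterms ++ minterms.map (fun m => PySem.Int.bor m ((1 : Int) <<< bit_pos.toNat))
  else if ib.2 = 1 then
    minterms.map (fun m => PySem.Int.bor m ((1 : Int) <<< bit_pos.toNat))
  else minterms

def expand_cubes_to_set_py (cubes : List (List Int)) (n_vars : Int) : List Int :=
  cubes.foldl
    (fun result cube =>
      let minterms := (PySem.List.enumerate cube 0).foldl (pvA_step n_vars) [(0 : Int)]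
      PySem.Set.update result minterms)
    PySem.Set.empty

-- ===== PORT B =====
-- body of B's first per-cube loop: accumulate (base, dash_bits)
def pvB_collect (n_vars : Int) (bd : Int × List Int) (ib : Int × Int) : Int × List Int :=
  let bit_pos := n_vars - 1 - ib.1
  if ib.2 = -1 then (bd.1, bd.2 ++ [(1 : Int) <<< bit_pos.toNat])
  else if ib.2 = 1 then (PySem.Int.bor bd.1 ((1 : Int) <<< bit_pos.toNat), bd.2)
  else bd

-- body of B's inner 'for idx, bit in enumerate(dash_bits)' loop: v for one mask
def pvB_val (bd : Int × List Int) (mask : Int) : Int :=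
  (PySem.List.enumerate bd.2 0).foldl
    (fun v ib => if PySem.Int.band (mask >>> ib.1.toNat) 1 ≠ 0 then PySem.Int.bor v ib.2 else v)
    bd.1

def expand_cubes_to_set_py_alt (cubes : List (List Int)) (n_vars : Int) : List Int :=
  cubes.foldl
    (fun result cube =>
      let bd := (PySem.List.enumerate cube 0).foldl (pvB_collect n_vars) ((0 : Int), ([] : List Int))
      (PySem.List.pyRange 0 ((1 : Int) <<< bd.2.length) 1).foldl
        (fun result mask => PySem.Set.add result (pvB_val bd mask)) result)
    PySem.Set.empty

-- ===== PRECONDITION & SPEC =====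
-- Pre_ excludes exactly the inputs where Python raises ValueError ('negative shift count'):
-- a cube position holding 1 or DASH whose bit position n_vars - 1 - i is negative.
def Pre_expand_cubes_to_set_py (cubes : List (List Int)) (n_vars : Int) : Prop :=
  ∀ cube ∈ cubes, ∀ p ∈ PySem.List.enumerate cube 0,
    (p.2 = -1 ∨ p.2 = 1) → 0 ≤ n_vars - 1 - p.1

instance (cubes : List (List Int)) (n_vars : Int) : Decidable (Pre_expand_cubes_to_set_py cubes n_vars) := by
  unfold Pre_expand_cubes_to_set_py; infer_instance

def pvWitness_expand_cubes_to_set_py : List (List Int) × Int := ([[1, -1, 0], [0, 0, -1]], 3)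

def Spec_expand_cubes_to_set_py (cubes : List (List Int)) (n_vars : Int) (out : List Int) : Prop := out = expand_cubes_to_set_py_alt cubes n_vars
instance (cubes : List (List Int)) (n_vars : Int) (out : List Int) : Decidable (Spec_expand_cubes_to_set_py cubes n_vars out) := by unfold Spec_expand_cubes_to_set_py; infer_instance

-- ===== CLAIM (what is proved, stated in full; the proofs are below) =====
def Claim_equal_expand_cubes_to_set_py : Prop := ∀ (cubes : List (List Int)) (n_vars : Int), Dom_expand_cubes_to_set_py cubes n_vars → Pre_expand_cubes_to_set_py cubes n_vars → Spec_expand_cubes_to_set_py cubes n_vars (expand_cubes_to_set_py cubes n_vars)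

-- ===== LEMMAS AND PROOFS =====

-- OR on nonnegative ints commutes on the right
theorem pv_bor_right_comm (a x y : Int) (ha : 0 ≤ a) (hx : 0 ≤ x) (hy : 0 ≤ y) :
    PySem.Int.bor (PySem.Int.bor a x) y = PySem.Int.bor (PySem.Int.bor a y) x := by
  obtain ⟨a', rfl⟩ := Int.eq_ofNat_of_zero_le ha
  obtain ⟨x', rfl⟩ := Int.eq_ofNat_of_zero_le hx
  obtain ⟨y', rfl⟩ := Int.eq_ofNat_of_zero_le hy
  simp only [PySem.Int.bor_natCast]
  rw [Nat.lor_assoc, Nat.lor_assoc, Nat.lor_comm x' y']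

theorem pv_bor_nonneg (a b : Int) (ha : 0 ≤ a) (hb : 0 ≤ b) : 0 ≤ PySem.Int.bor a b := by
  rw [PySem.Int.bor_of_nonneg ha hb]
  exact Int.natCast_nonneg _

theorem pv_shl_nonneg (t : Nat) : 0 ≤ (1 : Int) <<< t := by
  simp [Int.shiftLeft_eq]

-- the fold body of pvB_val, over an arbitrary index/bit pair list
def pvFold (mask : Int) (l : List (Int × Int)) (v : Int) : Int :=
  l.foldl (fun v ib => if PySem.Int.band (mask >>> ib.1.toNat) 1 ≠ 0 then PySem.Int.bor v ib.2 else v) v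

theorem pvB_val_eq_pvFold (bd : Int × List Int) (mask : Int) :
    pvB_val bd mask = pvFold mask (PySem.List.enumerate bd.2 0) bd.1 := rfl

-- L1: an OR on the seed can be pulled out of the fold
theorem pvFold_bor (mask : Int) : ∀ (l : List (Int × Int)) (v x : Int), 0 ≤ v → 0 ≤ x →
    (∀ p ∈ l, 0 ≤ p.2) → pvFold mask l (PySem.Int.bor v x) = PySem.Int.bor (pvFold mask l v) x := by
  intro l
  induction l with
  | nil => intro v x _ _ _; rfl
  | cons p l ih =>
    intro v x hv hx hl
    simp only [pvFold, List.foldl_cons]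
    by_cases hc : PySem.Int.band (mask >>> ((p.1.toNat : Nat) : Int)) 1 ≠ 0
    · rw [if_pos hc, if_pos hc]
      rw [pv_bor_right_comm v x p.2 hv hx (hl p (List.mem_cons_self))]
      exact ih (PySem.Int.bor v p.2) x
        (pv_bor_nonneg v p.2 hv (hl p (List.mem_cons_self))) hx
        (fun q hq => hl q (List.mem_cons_of_mem _ hq))
    · rw [if_neg hc, if_neg hc]
      exact ih v x hv hx (fun q hq => hl q (List.mem_cons_of_mem _ hq))

theorem pv_nat_high_bit (k m t : Nat) (ht : t < k) :
    (2 ^ k + m) >>> t &&& 1 = m >>> t &&& 1 := by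
  simp only [Nat.shiftRight_eq_div_pow, Nat.and_one_is_mod]
  have h1 : 2 ^ k + m = m + 2 ^ (k - t - 1) * 2 * 2 ^ t := by
    have : 2 ^ (k - t - 1) * 2 * 2 ^ t = 2 ^ k := by
      rw [mul_assoc, ← pow_succ', ← pow_add]; congr 1; omega
    omega
  rw [h1, Nat.add_mul_div_right _ _ (Nat.two_pow_pos t), Nat.add_mul_mod_self_right]

-- a mask bit above every consulted index is invisible to the fold
-- a natCast shifted right by a natCast is the Nat shift, cast
theorem pv_cast_shr (a b : Nat) : ((a : Int) >>> ((b : Nat) : Int)) = ((a >>> b : Nat) : Int) := by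
  simp [Nat.shiftRight_eq_div_pow]

theorem pvFold_high_bit (k m : Nat) : ∀ (l : List (Int × Int)) (v : Int),
    (∀ p ∈ l, 0 ≤ p.1 ∧ p.1 < (k : Int)) →
    pvFold ((2 ^ k + m : Nat) : Int) l v = pvFold ((m : Nat) : Int) l v := by
  intro l
  induction l with
  | nil => intro v _; rfl
  | cons p l ih =>
    intro v hl
    obtain ⟨h0, hk⟩ := hl p (List.mem_cons_self)
    have ht : p.1.toNat < k := by omega
    have hb : PySem.Int.band (((2 ^ k + m : Nat) : Int) >>> ((p.1.toNat : Nat) : Int)) 1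
        = PySem.Int.band (((m : Nat) : Int) >>> ((p.1.toNat : Nat) : Int)) 1 := by
      rw [pv_cast_shr, pv_cast_shr]
      have h1 : (1 : Int) = ((1 : Nat) : Int) := rfl
      rw [h1, PySem.Int.band_natCast, PySem.Int.band_natCast, pv_nat_high_bit k m p.1.toNat ht]
    simp only [pvFold, List.foldl_cons] at *
    rw [hb]
    exact ih _ (fun q hq => hl q (List.mem_cons_of_mem _ hq))

theorem pv_enum_idx_bound (ds : List Int) (p : Int × Int) (hp : p ∈ PySem.List.enumerate ds 0) :
    0 ≤ p.1 ∧ p.1 < (ds.length : Int) := by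
  have h1 : p.1 ∈ (PySem.List.enumerate ds 0).map (·.1) := List.mem_map_of_mem hp
  rw [PySem.List.map_fst_enumerate] at h1
  have := (PySem.List.mem_pyRange_one).1 h1
  constructor <;> omega

theorem pv_enum_snoc (ds : List Int) (x : Int) :
    PySem.List.enumerate (ds ++ [x]) 0 = PySem.List.enumerate ds 0 ++ [((ds.length : Int), x)] := by
  rw [PySem.List.enumerate_append]; simp [PySem.List.enumerate]

-- low masks do not see an appended dash bit
theorem pvB_val_append_low (base x : Int) (ds : List Int) (m : Nat) (hm : m < 2 ^ ds.length) :
    pvB_val (base, ds ++ [x]) (m : Int) = pvB_val (base, ds) (m : Int) := by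
  rw [pvB_val_eq_pvFold, pvB_val_eq_pvFold]
  simp only [pv_enum_snoc]
  unfold pvFold
  rw [List.foldl_append]
  simp only [List.foldl_cons, List.foldl_nil]
  have hm0 : m >>> ds.length = 0 := by
    rw [Nat.shiftRight_eq_div_pow]; exact Nat.div_eq_of_lt hm
  have hc : PySem.Int.band (((m : Nat) : Int) >>> ((((ds.length : Int)).toNat : Nat) : Int)) 1 = 0 := by
    rw [pv_cast_shr, Int.toNat_natCast, hm0]
    decide
  rw [if_neg (fun hne => hne hc)]

-- high masks OR the appended dash bit on top
theorem pvB_val_append_high (base x : Int) (ds : List Int) (m : Nat) (hm : m < 2 ^ ds.length) :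
    pvB_val (base, ds ++ [x]) ((2 ^ ds.length + m : Nat) : Int) =
      PySem.Int.bor (pvB_val (base, ds) (m : Int)) x := by
  rw [pvB_val_eq_pvFold, pvB_val_eq_pvFold]
  simp only [pv_enum_snoc]
  unfold pvFold
  rw [List.foldl_append]
  simp only [List.foldl_cons, List.foldl_nil]
  have hm1 : (2 ^ ds.length + m) >>> ds.length = 1 := by
    rw [Nat.shiftRight_eq_div_pow]
    exact Nat.div_eq_of_lt_le (by omega) (by omega)
  have hc : PySem.Int.band (((2 ^ ds.length + m : Nat) : Int) >>> ((((ds.length : Int)).toNat : Nat) : Int)) 1 = 1 := by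
    rw [pv_cast_shr, Int.toNat_natCast, hm1]
    decide
  have hcpos : PySem.Int.band (((2 ^ ds.length + m : Nat) : Int) >>> ((((ds.length : Int)).toNat : Nat) : Int)) 1 ≠ 0 := by
    rw [hc]; decide
  rw [if_pos hcpos]
  have hfold : pvFold ((2 ^ ds.length + m : Nat) : Int) (PySem.List.enumerate ds 0) base
      = pvFold ((m : Nat) : Int) (PySem.List.enumerate ds 0) base :=
    pvFold_high_bit ds.length m (PySem.List.enumerate ds 0) base (fun p hp => pv_enum_idx_bound ds p hp)
  unfold pvFold at hfold
  rw [hfold]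

theorem pv_enum_snd_mem (ds : List Int) (p : Int × Int) (hp : p ∈ PySem.List.enumerate ds 0) :
    p.2 ∈ ds := by
  have := List.mem_map_of_mem (f := (·.2)) hp
  rwa [PySem.List.map_snd_enumerate] at this

-- MAIN: A's doubling fold over one cube computes exactly B's base-plus-subsets list
theorem pv_cube_main (nv : Int) : ∀ (l : List (Int × Int)) (base : Int) (dashes : List Int),
    0 ≤ base → (∀ d ∈ dashes, 0 ≤ d) →
    l.foldl (pvA_step nv) ((List.range (2 ^ dashes.length)).map (fun (m : Nat) => pvB_val (base, dashes) ((m : Int))))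
      = (List.range (2 ^ (l.foldl (pvB_collect nv) (base, dashes)).2.length)).map
          (fun (m : Nat) => pvB_val (l.foldl (pvB_collect nv) (base, dashes)) ((m : Int))) := by
  intro l
  induction l with
  | nil => intro base dashes _ _; rfl
  | cons p l ih =>
    intro base dashes hbase hdash
    simp only [List.foldl_cons, pvA_step, pvB_collect]
    split_ifs with hA hB
    · -- DASH position: the doubled list is the subsets of dashes ++ [x]
      have hstep : (List.range (2 ^ dashes.length)).map (fun (m : Nat) => pvB_val (base, dashes) ((m : Int)))
            ++ ((List.range (2 ^ dashes.length)).map (fun (m : Nat) => pvB_val (base, dashes) ((m : Int)))).map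
                (fun m => PySem.Int.bor m ((1 : Int) <<< (nv - 1 - p.1).toNat))
          = (List.range (2 ^ (dashes ++ [(1 : Int) <<< (nv - 1 - p.1).toNat]).length)).map
              (fun (m : Nat) => pvB_val (base, dashes ++ [(1 : Int) <<< (nv - 1 - p.1).toNat]) ((m : Int))) := by
        rw [List.length_append, List.length_singleton, pow_succ, mul_two, List.range_add,
          List.map_append, List.map_map]
        congr 1
        · refine (List.map_congr_left ?_).symm
          intro m hm
          exact pvB_val_append_low base _ dashes m (List.mem_range.1 hm)
        · rw [List.map_map]
          refine List.map_congr_left ?_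
          intro m hm
          exact (pvB_val_append_high base _ dashes m (List.mem_range.1 hm)).symm
      rw [hstep]
      refine ih base (dashes ++ [(1 : Int) <<< (nv - 1 - p.1).toNat]) hbase ?_
      intro d hd
      rcases List.mem_append.1 hd with h | h
      · exact hdash d h
      · simp only [List.mem_singleton] at h; subst h; exact pv_shl_nonneg _
    · -- fixed 1: the OR folds into the base
      have hstep : ((List.range (2 ^ dashes.length)).map (fun (m : Nat) => pvB_val (base, dashes) ((m : Int)))).map
                (fun m => PySem.Int.bor m ((1 : Int) <<< (nv - 1 - p.1).toNat))
          = (List.range (2 ^ dashes.length)).map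
              (fun (m : Nat) => pvB_val (PySem.Int.bor base ((1 : Int) <<< (nv - 1 - p.1).toNat), dashes) ((m : Int))) := by
        rw [List.map_map]
        refine List.map_congr_left ?_
        intro m _
        show PySem.Int.bor (pvB_val (base, dashes) ((m : Int))) ((1 : Int) <<< (nv - 1 - p.1).toNat)
            = pvB_val (PySem.Int.bor base ((1 : Int) <<< (nv - 1 - p.1).toNat), dashes) ((m : Int))
        rw [pvB_val_eq_pvFold, pvB_val_eq_pvFold]
        exact (pvFold_bor ((m : Nat) : Int) (PySem.List.enumerate dashes 0) base _ hbase
          (pv_shl_nonneg _) (fun q hq => hdash q.2 (pv_enum_snd_mem dashes q hq))).symm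
      rw [hstep]
      exact ih (PySem.Int.bor base ((1 : Int) <<< (nv - 1 - p.1).toNat)) dashes
        (pv_bor_nonneg _ _ hbase (pv_shl_nonneg _)) hdash
    · exact ih base dashes hbase hdash

-- ===== VERDICT (by name: the statement is the Claim_ definition above) =====
theorem expand_cubes_to_set_py_spec : Claim_equal_expand_cubes_to_set_py := by
  intro cubes n_vars _ _
  unfold Spec_expand_cubes_to_set_py expand_cubes_to_set_py expand_cubes_to_set_py_alt
  have hfun : (fun (result : List Int) (cube : List Int) =>
        let minterms := (PySem.List.enumerate cube 0).foldl (pvA_step n_vars) [(0 : Int)]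
        PySem.Set.update result minterms)
      = (fun (result : List Int) (cube : List Int) =>
        let bd := (PySem.List.enumerate cube 0).foldl (pvB_collect n_vars) ((0 : Int), ([] : List Int))
        (PySem.List.pyRange 0 ((1 : Int) <<< bd.2.length) 1).foldl
          (fun result mask => PySem.Set.add result (pvB_val bd mask)) result) := by
    funext result cube
    have hmain := pv_cube_main n_vars (PySem.List.enumerate cube 0) 0 [] le_rfl
      (fun d hd => absurd hd (List.not_mem_nil))
    have h0 : (List.range (2 ^ (([] : List Int)).length)).map
        (fun (m : Nat) => pvB_val ((0 : Int), ([] : List Int)) ((m : Int))) = [(0 : Int)] := by decide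
    rw [h0] at hmain
    show PySem.Set.update result ((PySem.List.enumerate cube 0).foldl (pvA_step n_vars) [(0 : Int)]) = _
    rw [hmain]
    have hshl : (1 : Int) <<< ((PySem.List.enumerate cube 0).foldl (pvB_collect n_vars)
          ((0 : Int), ([] : List Int))).2.length
        = ((2 ^ ((PySem.List.enumerate cube 0).foldl (pvB_collect n_vars)
          ((0 : Int), ([] : List Int))).2.length : Nat) : Int) := by
      simp [Int.shiftLeft_eq]
    show _ = (PySem.List.pyRange 0 ((1 : Int) <<< ((PySem.List.enumerate cube 0).foldl (pvB_collect n_vars)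
          ((0 : Int), ([] : List Int))).2.length) 1).foldl
        (fun result mask => PySem.Set.add result
          (pvB_val ((PySem.List.enumerate cube 0).foldl (pvB_collect n_vars) ((0 : Int), ([] : List Int))) mask)) result
    rw [hshl, PySem.List.pyRange_zero_nat]
    show ((List.range (2 ^ ((PySem.List.enumerate cube 0).foldl (pvB_collect n_vars)
          ((0 : Int), ([] : List Int))).2.length)).map
        (fun (m : Nat) => pvB_val ((PySem.List.enumerate cube 0).foldl (pvB_collect n_vars)
          ((0 : Int), ([] : List Int))) ((m : Int)))).foldl PySem.Set.add result = _
    rw [List.foldl_map, List.foldl_map]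
  rw [hfun]
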